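-- pv_equiv track=rewrite | github.com/pypi-data/pypi-mirror-403 | packages/just-bash/just_bash-0.1.9-py3-none-any.whl/just_bash/commands/search_engine/regex.py | convert_replacement
-- ===== SOURCE A (Python) =====
-- def convert_replacement(replacement: str) -> str:
--     """Convert sed/ripgrep-style replacement to Python re.sub format.
--
--     Converts:
--         $0 -> \\g<0>  (full match)
--         $1, $2, ... -> \\1, \\2, ...  (numbered groups)
--         $name -> \\g<name>  (named groups)
--
--     Args:
--         replacement: The replacement string with $ references
--
--     Returns:
--         Replacement string with Python-style backreferences
--     """
--     result = []
--     i = 0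
--     while i < len(replacement):
--         char = replacement[i]
--
--         if char == "$" and i + 1 < len(replacement):
--             next_char = replacement[i + 1]
--
--             # $0 - full match (needs \g<0> syntax)
--             if next_char == "0":
--                 result.append(r"\g<0>")
--                 i += 2
--                 continue
--
--             # $1-9 - numbered groups
--             if next_char.isdigit():
--                 # Collect all digits
--                 j = i + 1
--                 while j < len(replacement) and replacement[j].isdigit():
--                     j += 1
--                 num = replacement[i + 1:j]
--                 result.append("\\" + num)
--                 i = j
--                 continue
--
--             # $name - named groups
--             if next_char.isalpha() or next_char == "_":
--                 j = i + 1
--                 while j < len(replacement) and (replacement[j].isalnum() or replacement[j] == "_"):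
--                     j += 1
--                 name = replacement[i + 1:j]
--                 result.append(r"\g<" + name + ">")
--                 i = j
--                 continue
--
--         result.append(char)
--         i += 1
--
--     return "".join(result)
-- ===== SOURCE B (Python) =====
-- def convert_replacement(replacement: str) -> str:
--     # Split on '$': every segment after the first was preceded by one consumed '$'.
--     parts = replacement.split('$')
--     out = [parts[0]]
--     for p in parts[1:]:
--         if p.startswith('0'):
--             out.append('\\g<0>' + p[1:])
--         elif p and p[0].isdigit():
--             # the leading digit run plus the rest is just p itself
--             out.append('\\' + p)
--         elif p and (p[0].isalpha() or p[0] == '_'):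
--             i = 1
--             while i < len(p) and (p[i].isalnum() or p[i] == '_'):
--                 i += 1
--             out.append('\\g<' + p[:i] + '>' + p[i:])
--         else:
--             # empty segment or non-reference first char: the consumed dollar was literal
--             out.append('$' + p)
--     return ''.join(out)
-- ===== Notes on version B (the rewrite author's own statement) =====
-- stated objective: faster
-- what changed: A walks the string with an index and manual lookahead in one while-loop; B splits the string on the dollar sign once (C-level str.split) and classifies each resulting segment by its first character, with the literal-dollar fallback falling out of the empty/non-reference segment case.
import Mathlib
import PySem

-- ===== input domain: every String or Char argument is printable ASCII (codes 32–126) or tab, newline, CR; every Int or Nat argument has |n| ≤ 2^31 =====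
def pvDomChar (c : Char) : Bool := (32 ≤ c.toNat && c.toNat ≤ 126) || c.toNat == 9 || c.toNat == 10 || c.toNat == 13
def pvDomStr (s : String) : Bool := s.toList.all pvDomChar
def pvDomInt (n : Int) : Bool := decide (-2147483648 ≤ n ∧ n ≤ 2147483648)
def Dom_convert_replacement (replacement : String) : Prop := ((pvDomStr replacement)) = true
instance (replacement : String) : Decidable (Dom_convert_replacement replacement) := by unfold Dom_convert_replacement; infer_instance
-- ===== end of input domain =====

-- B rewrites A's index-walking scanner as a split-on-'$' pass: one segment per consumed
-- '$', classified by its first character (objective: faster in a timing run's measurement).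

-- ===== PORT A =====
-- inner while loop "while j < len and replacement[j].isdigit(): j += 1" (returns the run and the rest)
def pvADigits : List Char → List Char × List Char
  | [] => ([], [])
  | c :: l =>
    if PySem.Chars.isdigit c then
      let (a, b) := pvADigits l
      (c :: a, b)
    else ([], c :: l)

-- inner while loop collecting [A-Za-z0-9_] for a $name reference
def pvAName : List Char → List Char × List Char
  | [] => ([], [])
  | c :: l =>
    if PySem.Chars.isalnum c || c = '_' then
      let (a, b) := pvAName l
      (c :: a, b)
    else ([], c :: l)

theorem pvADigits_snd_le (l : List Char) : (pvADigits l).2.length ≤ l.length := by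
  induction l with
  | nil => simp [pvADigits]
  | cons c l ih => simp [pvADigits]; split <;> simp <;> omega

theorem pvAName_snd_le (l : List Char) : (pvAName l).2.length ≤ l.length := by
  induction l with
  | nil => simp [pvAName]
  | cons c l ih => simp [pvAName]; split <;> simp <;> omega

-- the main while loop of A, scanning left to right
def pvAGo : List Char → List Char
  | [] => []
  | [c] => [c]                     -- i + 1 < len fails: append char literally
  | c :: next :: rest =>
    if c = '$' then
      if next = '0' then
        '\\' :: 'g' :: '<' :: '0' :: '>' :: pvAGo rest
      else if PySem.Chars.isdigit next then
        -- num = replacement[i+1:j] is the digit run, the scan resumes at j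
        '\\' :: ((pvADigits (next :: rest)).1 ++ pvAGo (pvADigits (next :: rest)).2)
      else if PySem.Chars.isalpha next || next = '_' then
        '\\' :: 'g' :: '<' :: ((pvAName (next :: rest)).1 ++ '>' :: pvAGo (pvAName (next :: rest)).2)
      else
        c :: pvAGo (next :: rest)
    else c :: pvAGo (next :: rest)
  termination_by l => l.length
  decreasing_by
  all_goals first
  | (have := pvADigits_snd_le (next :: rest); simp at this ⊢; omega)
  | (have := pvAName_snd_le (next :: rest); simp at this ⊢; omega)
  | (simp; omega)
  | simp

def convert_replacement (replacement : String) : String :=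
  String.mk (pvAGo replacement.toList)

-- ===== PORT B =====
-- replacement.split('$'): first segment and the list of segments each preceded by a '$'
def pvBSplit : List Char → List Char × List (List Char)
  | [] => ([], [])
  | c :: l =>
    let (h, t) := pvBSplit l
    if c = '$' then ([], h :: t) else (c :: h, t)

-- while loop of the named-group branch: leading run of [A-Za-z0-9_] after the first char
def pvBName : List Char → List Char × List Char
  | [] => ([], [])
  | c :: l =>
    if PySem.Chars.isalnum c || c = '_' then
      let (a, b) := pvBName l
      (c :: a, b)
    else ([], c :: l)

-- the body of B's for-loop: translate one segment that was preceded by a '$'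
def pvBSeg (p : List Char) : List Char :=
  match p with
  | [] => ['$']
  | c :: rest =>
    if c = '0' then '\\' :: 'g' :: '<' :: '0' :: '>' :: rest
    else if PySem.Chars.isdigit c then '\\' :: c :: rest
    else if PySem.Chars.isalpha c || c = '_' then
      let (name, r) := pvBName rest
      '\\' :: 'g' :: '<' :: c :: (name ++ '>' :: r)
    else '$' :: c :: rest

def convert_replacement_alt (replacement : String) : String :=
  let (h, t) := pvBSplit replacement.toList
  String.mk (h ++ (t.map pvBSeg).flatten)

-- ===== PRECONDITION & SPEC =====
def Spec_convert_replacement (replacement : String) (out : String) : Prop := out = convert_replacement_alt replacement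
instance (replacement : String) (out : String) : Decidable (Spec_convert_replacement replacement out) := by unfold Spec_convert_replacement; infer_instance

-- ===== CLAIM (what is proved, stated in full; the proofs are below) =====
def Claim_equal_convert_replacement : Prop := ∀ (replacement : String), Dom_convert_replacement replacement → Spec_convert_replacement replacement (convert_replacement replacement)

-- ===== LEMMAS AND PROOFS =====

theorem charle (a b : Char) : a ≤ b ↔ a.toNat ≤ b.toNat := by
  rw [Char.le_def, UInt32.le_iff_toNat_le]; rfl

theorem isdigit_ne_dollar (c : Char) (h : PySem.Chars.isdigit c = true) : c ≠ '$' := by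
  intro e; subst e; simp [PySem.Chars.isdigit] at h

theorem name_ne_dollar (c : Char) (h : PySem.Chars.isalnum c = true ∨ c = '_') : c ≠ '$' := by
  intro e; subst e
  rcases h with h | h
  · revert h; decide
  · revert h; decide

theorem isalpha_not_isdigit (c : Char) (h : PySem.Chars.isalpha c = true ∨ c = '_') :
    PySem.Chars.isdigit c = false := by
  rcases h with h | h
  · simp only [PySem.Chars.isalpha, PySem.Chars.isupper, PySem.Chars.islower,
      Bool.or_eq_true, Bool.and_eq_true, decide_eq_true_eq, charle,
      show ('A' : Char).toNat = 65 from rfl, show ('Z' : Char).toNat = 90 from rfl,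
      show ('a' : Char).toNat = 97 from rfl, show ('z' : Char).toNat = 122 from rfl] at h
    simp only [PySem.Chars.isdigit, Bool.and_eq_false_iff, decide_eq_false_iff_not, charle, not_le,
      show ('0' : Char).toNat = 48 from rfl, show ('9' : Char).toNat = 57 from rfl]
    omega
  · subst h; decide

theorem pvAName_eq_pvBName (l : List Char) : pvAName l = pvBName l := by
  induction l with
  | nil => rfl
  | cons c l ih => simp [pvAName, pvBName, ih]

-- pvBSplit distributes over a run of non-'$' characters
theorem pvBSplit_append_run (d l : List Char) (hd : ∀ c ∈ d, c ≠ '$') :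
    pvBSplit (d ++ l) = ((d ++ (pvBSplit l).1, (pvBSplit l).2) : List Char × List (List Char)) := by
  induction d with
  | nil => simp
  | cons c d ih =>
    have hc : c ≠ '$' := hd c (by simp)
    simp [pvBSplit, ih (fun x hx => hd x (by simp [hx])), hc]

theorem pvADigits_all (l : List Char) : ∀ c ∈ (pvADigits l).1, PySem.Chars.isdigit c = true := by
  induction l with
  | nil => simp [pvADigits]
  | cons c l ih =>
    by_cases h : PySem.Chars.isdigit c = true
    · simp only [pvADigits, h, if_pos]
      intro x hx
      simp at hx
      rcases hx with e | hx
      · subst e; exact h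
      · exact ih x hx
    · simp [pvADigits, h]

theorem pvADigits_decomp (l : List Char) : l = (pvADigits l).1 ++ (pvADigits l).2 := by
  induction l with
  | nil => simp [pvADigits]
  | cons c l ih =>
    by_cases h : PySem.Chars.isdigit c = true
    · simp only [pvADigits, h, if_pos]; simpa using ih
    · simp [pvADigits, h]

theorem pvBName_all (l : List Char) :
    ∀ c ∈ (pvBName l).1, PySem.Chars.isalnum c = true ∨ c = '_' := by
  induction l with
  | nil => simp [pvBName]
  | cons c l ih =>
    by_cases h : (PySem.Chars.isalnum c || c = '_') = true
    · simp only [pvBName, h, if_pos]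
      intro x hx
      simp at hx
      rcases hx with e | hx
      · subst e; simpa using h
      · exact ih x hx
    · simp [pvBName, h]

theorem pvBName_decomp (l : List Char) : l = (pvBName l).1 ++ (pvBName l).2 := by
  induction l with
  | nil => simp [pvBName]
  | cons c l ih =>
    by_cases h : (PySem.Chars.isalnum c || c = '_') = true
    · simp only [pvBName, h, if_pos]; simpa using ih
    · simp [pvBName, h]

theorem pvBName_rest (l : List Char) :
    (pvBName l).2 = [] ∨
      ∃ x r, (pvBName l).2 = x :: r ∧ (PySem.Chars.isalnum x || x = '_') = false := by
  induction l with
  | nil => simp [pvBName]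
  | cons c l ih =>
    by_cases h : (PySem.Chars.isalnum c || c = '_') = true
    · simpa [pvBName, h] using ih
    · right; exact ⟨c, l, by simp [pvBName, h], by simpa using h⟩

-- re-parsing a name run followed by a segment that cannot extend it returns it unchanged
theorem pvBName_run_append (n m : List Char)
    (hn : ∀ c ∈ n, PySem.Chars.isalnum c = true ∨ c = '_')
    (hm : m = [] ∨ ∃ x r, m = x :: r ∧ (PySem.Chars.isalnum x || x = '_') = false) :
    pvBName (n ++ m) = (n, m) := by
  induction n with
  | nil =>
    rcases hm with h | ⟨x, r, h, hx⟩
    · simp [h, pvBName]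
    · simp [h, pvBName, hx]
  | cons c n ih =>
    have hc : (PySem.Chars.isalnum c || c = '_') = true := by
      rcases hn c (by simp) with h | h <;> simp [h]
    simp [pvBName, hc, ih (fun x hx => hn x (by simp [hx]))]

-- pvBSplit on a string starting with '$'
theorem pvBSplit_dollar (l : List Char) :
    pvBSplit ('$' :: l) = (([], (pvBSplit l).1 :: (pvBSplit l).2) : List Char × List (List Char)) := by
  simp [pvBSplit]

-- key lemma: A's scan equals B's split-and-translate, on raw character lists
theorem pvAGo_eq (l : List Char) :
    pvAGo l = (pvBSplit l).1 ++ ((pvBSplit l).2.map pvBSeg).flatten := by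
  induction hn : l.length using Nat.strong_induction_on generalizing l with
  | _ n ih =>
  match l with
  | [] => simp [pvAGo, pvBSplit]
  | [c] =>
    by_cases hc : c = '$'
    · subst hc; simp [pvAGo, pvBSplit, pvBSeg]
    · simp [pvAGo, pvBSplit, hc]
  | c :: next :: rest =>
    have ihrest : pvAGo (next :: rest) =
        (pvBSplit (next :: rest)).1 ++ ((pvBSplit (next :: rest)).2.map pvBSeg).flatten := by
      subst hn; exact ih _ (by simp) _ rfl
    by_cases hc : c = '$'
    case neg =>
      simp only [pvAGo, hc, ihrest]
      simp [pvBSplit, hc]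
    case pos =>
      subst hc
      by_cases h0 : next = '0'
      · subst h0
        have ihr : pvAGo rest = (pvBSplit rest).1 ++ ((pvBSplit rest).2.map pvBSeg).flatten := by
          subst hn; exact ih _ (by simp) _ rfl
        simp [pvAGo, pvBSplit, pvBSeg, ihr]
      · by_cases hd : PySem.Chars.isdigit next = true
        · -- digit-run branch
          have hsplit := pvADigits_decomp (next :: rest)
          have hall := pvADigits_all (next :: rest)
          have hlen := pvADigits_snd_le (next :: rest)
          have ihr : pvAGo (pvADigits (next :: rest)).2 =
              (pvBSplit (pvADigits (next :: rest)).2).1 ++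
                ((pvBSplit (pvADigits (next :: rest)).2).2.map pvBSeg).flatten := by
            subst hn; exact ih _ (by simp at hlen ⊢; omega) _ rfl
          have hbs : pvBSplit (next :: rest) =
              ((pvADigits (next :: rest)).1 ++ (pvBSplit (pvADigits (next :: rest)).2).1,
                (pvBSplit (pvADigits (next :: rest)).2).2) := by
            conv_lhs => rw [hsplit]
            exact pvBSplit_append_run _ _ (fun c hc => isdigit_ne_dollar c (hall c hc))
          have hnumc : (pvADigits (next :: rest)).1 = next :: (pvADigits rest).1 := by
            simp [pvADigits, hd]
          simp only [pvAGo, if_pos rfl, if_neg h0, hd, if_pos, ihr, pvBSplit_dollar,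
            List.nil_append, List.map_cons, List.flatten_cons, hbs, hnumc]
          simp [pvBSeg, h0, hd]
        · by_cases ha : (PySem.Chars.isalpha next || next = '_') = true
          · -- named-group branch
            have ha' : PySem.Chars.isalpha next = true ∨ next = '_' := by simpa using ha
            have hnn : (PySem.Chars.isalnum next || next = '_') = true := by
              rcases ha' with h | h
              · simp [PySem.Chars.isalnum, h]
              · simp [h]
            have heq : pvAName (next :: rest) = pvBName (next :: rest) :=
              pvAName_eq_pvBName (next :: rest)
            have hsplit := pvBName_decomp (next :: rest)
            have hall := pvBName_all (next :: rest)
            have hlen := pvAName_snd_le (next :: rest)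
            rw [heq] at hlen
            have ihr : pvAGo (pvBName (next :: rest)).2 =
                (pvBSplit (pvBName (next :: rest)).2).1 ++
                  ((pvBSplit (pvBName (next :: rest)).2).2.map pvBSeg).flatten := by
              subst hn; exact ih _ (by simp at hlen ⊢; omega) _ rfl
            have hbs : pvBSplit (next :: rest) =
                ((pvBName (next :: rest)).1 ++ (pvBSplit (pvBName (next :: rest)).2).1,
                  (pvBSplit (pvBName (next :: rest)).2).2) := by
              conv_lhs => rw [hsplit]
              exact pvBSplit_append_run _ _ (fun c hc => name_ne_dollar c (hall c hc))
            have hnamec : (pvBName (next :: rest)).1 = next :: (pvBName rest).1 := by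
              simp [pvBName, hnn]
            have hrc : (pvBName (next :: rest)).2 = (pvBName rest).2 := by
              simp [pvBName, hnn]
            -- re-parsing the name run inside B's segment gives it back unchanged
            have hsegname : pvBName ((pvBName rest).1 ++ (pvBSplit (pvBName (next :: rest)).2).1) =
                ((pvBName rest).1, (pvBSplit (pvBName (next :: rest)).2).1) := by
              apply pvBName_run_append
              · intro x hx
                apply hall
                rw [hnamec]; simp [hx]
              · rw [hrc]
                rcases pvBName_rest rest with h | ⟨x, rr, h, hx⟩
                · left; rw [h]; simp [pvBSplit]
                · by_cases hxd : x = '$'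
                  · left; rw [h, hxd, pvBSplit_dollar]
                  · right
                    refine ⟨x, (pvBSplit rr).1, ?_, hx⟩
                    rw [h]
                    simp [pvBSplit, hxd]
            have hnd : PySem.Chars.isdigit next = false := isalpha_not_isdigit next ha'
            simp only [pvAGo, if_pos rfl, if_neg h0, hnd, Bool.false_eq_true, if_neg, ha, if_pos,
              heq, ihr, pvBSplit_dollar, List.nil_append, List.map_cons, List.flatten_cons, hbs,
              hnamec]
            simp [pvBSeg, h0, hnd, ha', hsegname]
          · -- fallback: literal '$'
            have hd' : PySem.Chars.isdigit next = false := by simpa using hd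
            have ha' : (PySem.Chars.isalpha next || next = '_') = false := by simpa using ha
            simp only [pvAGo, if_neg h0, hd', Bool.false_eq_true, ha', ihrest]
            by_cases hnx : next = '$'
            · subst hnx
              simp [pvBSplit_dollar, pvBSeg]
            · have hnn : (PySem.Chars.isalnum next || next = '_') = false := by
                simp at ha'
                simp [PySem.Chars.isalnum, ha'.1, hd', ha'.2]
              simp at ha' hnn
              simp [pvBSplit, hnx, pvBSeg, h0, hd', ha'.1, ha'.2]

-- ===== VERDICT (by name: the statement is the Claim_ definition above) =====
theorem convert_replacement_spec : Claim_equal_convert_replacement := by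
  intro replacement _
  unfold Spec_convert_replacement convert_replacement convert_replacement_alt
  rw [pvAGo_eq]
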